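-- pv_equiv track=rewrite | github.com/Carovanandel/HLA-typing | scripts/formatting_lab.py | format_options
-- ===== SOURCE A (Python) =====
-- def format_options(input_row, allele):
--     genotype = '' #create an empty string for the formatted genotype
--     hla_gene = input_row[allele].split('*')[0] #determine the hla gene so it can be included in all options for correct nomenclature
--     i = 0
--     for option in input_row[allele].split('/'): #split multiple genotype options
--         if i == 0: genotype += f'HLA-{option}' #the first option already includes the hla gene
--         else: genotype += f'/HLA-{hla_gene}*{option}' #add the hla gene to all other options
--         i +=1
--
--     return genotype
-- ===== SOURCE B (Python) =====
-- def format_options(input_row, allele):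
--     # Character-level scan: prepend 'HLA-', and expand each '/' into '/HLA-{gene}*'.
--     s = input_row[allele]
--     star = s.find('*')
--     hla_gene = s if star == -1 else s[:star]
--     insert = f'/HLA-{hla_gene}*'
--     pieces = ['HLA-']
--     for ch in s:
--         pieces.append(insert if ch == '/' else ch)
--     return ''.join(pieces)
-- ===== Notes on version B (the rewrite author's own statement) =====
-- stated objective: alternative
-- what changed: Instead of splitting on '/' and looping over the options with a first-iteration counter, B locates the gene with str.find plus a slice and does one character-level scan of the string, expanding each '/' character into '/HLA-{gene}*' in place.
import Mathlib
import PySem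

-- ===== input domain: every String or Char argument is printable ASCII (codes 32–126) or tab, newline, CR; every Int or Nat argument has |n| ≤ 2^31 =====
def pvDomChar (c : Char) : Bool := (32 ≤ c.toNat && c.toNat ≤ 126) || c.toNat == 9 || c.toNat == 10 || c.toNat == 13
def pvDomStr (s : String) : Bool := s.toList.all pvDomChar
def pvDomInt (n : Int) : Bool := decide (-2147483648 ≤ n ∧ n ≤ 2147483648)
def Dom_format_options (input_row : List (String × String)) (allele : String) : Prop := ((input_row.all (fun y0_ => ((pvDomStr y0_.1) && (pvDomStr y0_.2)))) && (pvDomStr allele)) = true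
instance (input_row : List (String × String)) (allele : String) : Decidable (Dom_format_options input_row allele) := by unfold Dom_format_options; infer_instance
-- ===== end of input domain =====

-- B replaces A's split('/')-and-counter loop by a character-level scan: it finds the gene with
-- str.find + a slice and expands each '/' character in place; equal return values, no speed claim.

-- ===== PORT A =====
-- literal port of A: split('/'), loop with counter i, branch on i == 0
def format_options (input_row : List (String × String)) (allele : String) : String :=
  -- input_row[allele]: KeyError when allele is not a key — excluded by Pre_; '' is the placeholder default
  let s := (PySem.Dict.get? ⟨input_row⟩ allele).getD ""
  -- input_row[allele].split('*')[0]: split on a nonempty sep is never empty, so [0] never raises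
  let hla_gene := ((PySem.List.pyGet? (PySem.Chars.splitOn s.toList ['*']) 0).getD [])
  let r := (PySem.Chars.splitOn s.toList ['/']).foldl
    (fun (st : List Char × Int) option =>
      if st.2 == 0 then (st.1 ++ (['H','L','A','-'] ++ option), st.2 + 1)
      else (st.1 ++ (['/','H','L','A','-'] ++ hla_gene ++ ['*'] ++ option), st.2 + 1))
    ([], 0)
  String.ofList r.1

-- ===== PORT B =====
-- literal port of B: star = s.find('*'); gene = s if star == -1 else s[:star];
-- then one pass over the characters of s, expanding each '/' into '/HLA-{gene}*'
def format_options_alt (input_row : List (String × String)) (allele : String) : String :=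
  let cs := ((PySem.Dict.get? ⟨input_row⟩ allele).getD "").toList
  let star := PySem.Chars.find cs ['*']
  let hla_gene := if star == -1 then cs else PySem.Chars.slice cs none (some star)
  let ins := ['/','H','L','A','-'] ++ hla_gene ++ ['*']
  String.ofList (cs.foldl (fun pieces ch => pieces ++ (if ch == '/' then ins else [ch]))
    ['H','L','A','-'])

-- ===== PRECONDITION & SPEC =====
-- Pre_ excludes exactly the inputs where input_row[allele] raises KeyError (allele not a key of the dict)
def Pre_format_options (input_row : List (String × String)) (allele : String) : Prop :=
  (PySem.Dict.get? ⟨input_row⟩ allele).isSome = true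
instance (input_row : List (String × String)) (allele : String) : Decidable (Pre_format_options input_row allele) := by unfold Pre_format_options; infer_instance
def pvWitness_format_options : (List (String × String)) × String := ([("allele1", "A*01:01/01:02N/02:07")], "allele1")

def Spec_format_options (input_row : List (String × String)) (allele : String) (out : String) : Prop := out = format_options_alt input_row allele
instance (input_row : List (String × String)) (allele : String) (out : String) : Decidable (Spec_format_options input_row allele out) := by unfold Spec_format_options; infer_instance

-- ===== CLAIM (what is proved, stated in full; the proofs are below) =====
def Claim_equal_format_options : Prop := ∀ (input_row : List (String × String)) (allele : String), Dom_format_options input_row allele → Pre_format_options input_row allele → Spec_format_options input_row allele (format_options input_row allele)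

-- ===== LEMMAS AND PROOFS =====

-- splitOn.go: the accumulator is a prefix
theorem sgo_acc (old : List Char) (fuel : Nat) : ∀ (l cur : List Char) (acc : List (List Char)),
    PySem.Chars.splitOn.go old fuel l cur acc = acc.reverse ++ PySem.Chars.splitOn.go old fuel l cur [] := by
  induction fuel with
  | zero => intro l cur acc; simp [PySem.Chars.splitOn.go]
  | succ f ih =>
    intro l cur acc
    cases l with
    | nil => simp [PySem.Chars.splitOn.go]
    | cons c t =>
      simp only [PySem.Chars.splitOn.go]
      split
      · rw [ih, ih (acc := [cur.reverse])]; simp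
      · exact ih _ _ _

-- splitOn.go: the pending chunk prefixes the head of the result
theorem sgo_cur (old : List Char) (fuel : Nat) : ∀ (l cur : List Char),
    PySem.Chars.splitOn.go old fuel l cur [] =
      (PySem.Chars.splitOn.go old fuel l [] []).modifyHead (cur.reverse ++ ·) := by
  induction fuel with
  | zero => intro l cur; simp [PySem.Chars.splitOn.go]
  | succ f ih =>
    intro l cur
    cases l with
    | nil => simp [PySem.Chars.splitOn.go]
    | cons c t =>
      simp only [PySem.Chars.splitOn.go]
      split
      · simp only [List.reverse_nil]
        rw [sgo_acc old f _ [] [cur.reverse], sgo_acc old f _ [] [[]]]; simp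
      · rw [ih _ [c], ih _ (c :: cur)]
        rcases h : PySem.Chars.splitOn.go old f t [] [] with _ | ⟨p, r⟩
        · simp
        · simp

-- single-character split: head is the takeWhile prefix, the tail pieces are sep-free,
-- and interleaving the separator back reconstructs the string
theorem sgo_spec (c : Char) (fuel : Nat) : ∀ cs : List Char, cs.length ≤ fuel →
    ∃ rest : List (List Char),
      PySem.Chars.splitOn.go [c] fuel cs [] [] = (cs.takeWhile (fun x => x ≠ c)) :: rest ∧
      (∀ q ∈ rest, c ∉ q) ∧
      cs = cs.takeWhile (fun x => x ≠ c) ++ rest.flatMap (fun q => c :: q) := by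
  induction fuel with
  | zero =>
    intro cs h
    have : cs = [] := List.eq_nil_of_length_eq_zero (Nat.le_zero.mp h)
    subst this
    exact ⟨[], by simp [PySem.Chars.splitOn.go]⟩
  | succ f ih =>
    intro cs h
    cases cs with
    | nil => exact ⟨[], by simp [PySem.Chars.splitOn.go]⟩
    | cons x t =>
      have ht : t.length ≤ f := by simp at h; omega
      obtain ⟨rest', h1, h2, h3⟩ := ih t ht
      simp only [PySem.Chars.splitOn.go]
      split
      · rename_i hpre
        have hx : x = c := by
          simp only [List.isPrefixOf, Bool.and_true, beq_iff_eq] at hpre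
          exact hpre.symm
        subst hx
        rw [List.length_singleton, List.drop_one, List.tail_cons, List.reverse_nil,
          sgo_acc [x] f t [] [[]], h1]
        refine ⟨t.takeWhile (fun y => y ≠ x) :: rest', by simp, ?_, ?_⟩
        · intro q hq
          rcases List.mem_cons.mp hq with rfl | hq'
          · intro hmem
            have := List.mem_takeWhile_imp hmem
            simp at this
          · exact h2 q hq'
        · simp only [List.takeWhile_cons]
          simp only [ne_eq, not_true_eq_false, decide_false, Bool.false_eq_true, if_false]
          simpa using h3
      · rename_i hpre
        have hx : x ≠ c := by
          simp only [List.isPrefixOf, Bool.and_true, beq_iff_eq] at hpre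
          exact fun e => hpre e.symm
        rw [sgo_cur [c] f t [x], h1]
        refine ⟨rest', ?_, h2, ?_⟩
        · simp [hx]
        · have htw : (x :: t).takeWhile (fun y => y ≠ c) = x :: t.takeWhile (fun y => y ≠ c) := by
            simp [hx]
          rw [htw, List.cons_append]
          exact congrArg (x :: ·) h3

theorem split_spec (c : Char) (cs : List Char) :
    ∃ rest : List (List Char),
      PySem.Chars.splitOn cs [c] = (cs.takeWhile (fun x => x ≠ c)) :: rest ∧
      (∀ q ∈ rest, c ∉ q) ∧
      cs = cs.takeWhile (fun x => x ≠ c) ++ rest.flatMap (fun q => c :: q) := by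
  simpa [PySem.Chars.splitOn] using sgo_spec c (cs.length + 1) cs (by omega)

theorem tw_all (c : Char) (cs : List Char) (h : c ∉ cs) : cs.takeWhile (fun x => x ≠ c) = cs := by
  rw [List.takeWhile_eq_self_iff]
  intro x hx
  simp only [ne_eq, decide_eq_true_eq]
  exact fun e => h (e ▸ hx)

theorem pfx_single (c : Char) (cs : List Char) : ([c] <+: cs) ↔ cs.head? = some c := by
  cases cs <;> simp [List.prefix_cons_iff, eq_comm]

theorem take_eq_tw (cs : List Char) (n : Nat) (c : Char)
    (h1 : ∀ i < n, cs[i]? ≠ some c) (h2 : cs[n]? = some c) :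
    cs.take n = cs.takeWhile (fun x => x ≠ c) := by
  induction cs generalizing n with
  | nil => simp at h2
  | cons a t ih =>
    cases n with
    | zero => simp only [List.getElem?_cons_zero, Option.some.injEq] at h2; simp [h2]
    | succ m =>
      have ha : a ≠ c := by have := h1 0 (by omega); simpa using this
      have ht := ih m (fun i hi => by simpa using h1 (i+1) (by omega)) (by simpa using h2)
      simp [ha, ht]

-- B's find-and-slice gene equals the takeWhile prefix (= A's split('*')[0])
theorem gene_eq (c : Char) (cs : List Char) :
    (if PySem.Chars.find cs [c] == -1 then cs
     else PySem.Chars.slice cs none (some (PySem.Chars.find cs [c]))) =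
      cs.takeWhile (fun x => x ≠ c) := by
  by_cases h : PySem.Chars.find cs [c] = -1
  · have hnin : c ∉ cs := by
      have := (PySem.Chars.find_eq_neg_one_iff cs [c]).mp h
      exact fun hm => this ((List.singleton_infix_iff c cs).mpr hm)
    simp only [h, beq_self_eq_true, if_true]
    simpa using (tw_all c cs hnin).symm
  · have hge : 0 ≤ PySem.Chars.find cs [c] := by
      have := PySem.Chars.neg_one_le_find cs [c]; omega
    obtain ⟨hp, hmin⟩ := PySem.Chars.find_spec (s := cs) (sub := [c]) hge
    have hbeq : (PySem.Chars.find cs [c] == -1) = false := by simpa using h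
    rw [hbeq, if_neg (by simp)]
    simp only [PySem.Chars.slice]
    rw [PySem.List.slice_to cs hge]
    apply take_eq_tw
    · intro i hi hcontra
      exact hmin i hi ((pfx_single c _).mpr (by rw [List.head?_drop]; exact hcontra))
    · have := (pfx_single c _).mp hp
      rwa [List.head?_drop] at this

-- the tail of A's loop (i > 0) appends '/HLA-{gene}*' ++ piece for every piece
theorem foldA_tail (g : List Char) (rest : List (List Char)) :
    ∀ (acc : List Char) (i : Int), 0 < i →
    ((rest.foldl
      (fun (st : List Char × Int) option =>
        if st.2 == 0 then (st.1 ++ (['H','L','A','-'] ++ option), st.2 + 1)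
        else (st.1 ++ (['/','H','L','A','-'] ++ g ++ ['*'] ++ option), st.2 + 1))
      (acc, i)).1) = acc ++ rest.flatMap (fun q => (['/','H','L','A','-'] ++ g ++ ['*']) ++ q) := by
  induction rest with
  | nil => intro acc i hi; simp
  | cons q r ih =>
    intro acc i hi
    have h0 : (i == 0) = false := by simp; omega
    simp only [List.foldl_cons, h0, Bool.false_eq_true, if_false]
    rw [ih _ (i+1) (by omega)]
    simp

-- B's character expansion is the identity on a slash-free chunk
theorem fm_id (ins : List Char) (l : List Char) (h : '/' ∉ l) :
    l.flatMap (fun ch => if ch == '/' then ins else [ch]) = l := by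
  induction l with
  | nil => rfl
  | cons a t ih =>
    simp only [List.mem_cons, not_or] at h
    have ha : (a == '/') = false := beq_eq_false_iff_ne.mpr (fun e => h.1 e.symm)
    simp only [List.flatMap_cons, ha, Bool.false_eq_true, if_false, ih h.2]
    rfl

-- B's character expansion on the re-interleaved tail inserts ins before each chunk
theorem fm_rest (ins : List Char) (rest : List (List Char)) (h : ∀ q ∈ rest, '/' ∉ q) :
    (rest.flatMap (fun q => '/' :: q)).flatMap (fun ch => if ch == '/' then ins else [ch]) =
      rest.flatMap (fun q => ins ++ q) := by
  induction rest with
  | nil => rfl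
  | cons q r ih =>
    simp only [List.flatMap_cons, List.flatMap_append]
    rw [ih (fun x hx => h x (List.mem_cons_of_mem q hx))]
    have hq := h q (List.mem_cons_self)
    rw [fm_id ins q hq]
    simp

-- whole-string version of fm_id/fm_rest: expanding '/' over the reconstructed string
theorem fm_total (ins p : List Char) (rest : List (List Char))
    (hp : '/' ∉ p) (h2 : ∀ q ∈ rest, '/' ∉ q) :
    (p ++ rest.flatMap (fun q => '/' :: q)).flatMap
        (fun ch => if ch == '/' then ins else [ch]) =
      p ++ rest.flatMap (fun q => ins ++ q) := by
  rw [List.flatMap_append, fm_id ins p hp, fm_rest ins rest h2]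

-- ===== VERDICT (by name: the statement is the Claim_ definition above) =====
theorem format_options_spec : Claim_equal_format_options := by
  intro input_row allele _hdom _hpre
  unfold Spec_format_options format_options format_options_alt
  dsimp only
  set cs := ((PySem.Dict.get? ⟨input_row⟩ allele).getD "").toList with hcs
  rw [gene_eq]
  obtain ⟨restS, hS1, -, -⟩ := split_spec '*' cs
  rw [hS1]
  rw [show ∀ (x : List Char) (l : List (List Char)),
        (PySem.List.pyGet? (x :: l) 0).getD [] = x from fun x l => by
          simp [PySem.List.pyGet?, PySem.List.pyIdx?]]
  obtain ⟨rest, h1, h2, h3⟩ := split_spec '/' cs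
  rw [h1]
  simp only [List.foldl_cons, beq_self_eq_true, if_true, List.nil_append, zero_add]
  rw [foldA_tail _ rest _ 1 (by omega)]
  rw [PySem.List.foldl_append_eq_flatMap]
  set gstar := cs.takeWhile (fun x => x ≠ '*') with hg
  set p := cs.takeWhile (fun x => x ≠ '/') with hpdef
  have hpns : '/' ∉ p := by
    intro hm
    have := List.mem_takeWhile_imp hm
    simp at this
  rw [h3, fm_total _ p rest hpns h2]
  simp
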